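-- pv_equiv track=rewrite | github.com/l1351868270/implicit_gemm.triton | spconv_np.py | row_array_idx
-- ===== SOURCE A (Python) =====
-- from typing import List
--
-- def row_array_idx(indices: List[int], shape: List[int]):
--     ndim = len(shape)
--     offset = 0
--     m = 1
--     for i in range(ndim - 1, -1, -1):
--         offset += m * indices[i]
--         m *= shape[i]
--     return offset
-- ===== SOURCE B (Python) =====
-- def row_array_idx(indices, shape):
--     offset = 0
--     for i in range(len(shape)):
--         offset = offset * shape[i] + indices[i]
--     return offset
-- ===== Notes on version B (the rewrite author's own statement) =====
-- stated objective: idiomatic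
-- what changed: Replaces the backward loop that maintains a separate running multiplier m by a forward Horner evaluation with a single accumulator (offset = offset*shape[i] + indices[i]).
import Mathlib
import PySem

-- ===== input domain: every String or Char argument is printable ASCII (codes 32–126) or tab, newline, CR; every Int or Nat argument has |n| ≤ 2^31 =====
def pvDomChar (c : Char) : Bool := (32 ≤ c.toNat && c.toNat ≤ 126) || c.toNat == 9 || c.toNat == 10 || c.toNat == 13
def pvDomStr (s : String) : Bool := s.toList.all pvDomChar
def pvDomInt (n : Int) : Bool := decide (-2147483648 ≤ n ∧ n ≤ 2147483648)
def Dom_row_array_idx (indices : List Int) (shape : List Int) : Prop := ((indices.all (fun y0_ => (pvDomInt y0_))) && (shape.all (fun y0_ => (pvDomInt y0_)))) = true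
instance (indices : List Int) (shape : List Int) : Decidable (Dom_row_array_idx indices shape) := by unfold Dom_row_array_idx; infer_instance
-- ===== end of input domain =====

-- B replaces A's backward loop with running multiplier by a forward Horner evaluation (single accumulator); idiomatic, same cost.


-- ===== PORT A =====
-- literal port: ndim = len(shape); loop i over range(ndim-1, -1, -1) with state (offset, m);
-- indices[i]/shape[i] via pyGetD (under Pre_ every access is in range, as in the Python)
def row_array_idx (indices : List Int) (shape : List Int) : Int :=
  let ndim : Int := (shape.length : Int)
  let st :=
    (PySem.List.pyRange (ndim - 1) (-1) (-1)).foldl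
      (fun (s : Int × Int) i =>
        (s.1 + s.2 * PySem.List.pyGetD indices i 0, s.2 * PySem.List.pyGetD shape i 0))
      (0, 1)
  st.1

-- ===== PORT B =====
-- literal port of Source B: forward loop, single accumulator offset = offset*shape[i] + indices[i]
def row_array_idx_alt (indices : List Int) (shape : List Int) : Int :=
  (PySem.List.pyRange 0 (shape.length : Int) 1).foldl
    (fun off i => off * PySem.List.pyGetD shape i 0 + PySem.List.pyGetD indices i 0)
    0

-- ===== PRECONDITION & SPEC =====
-- Pre_ excludes exactly the inputs where A raises IndexError: indices shorter than shape.
def Pre_row_array_idx (indices : List Int) (shape : List Int) : Prop :=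
  shape.length ≤ indices.length
instance (indices : List Int) (shape : List Int) : Decidable (Pre_row_array_idx indices shape) := by
  unfold Pre_row_array_idx; infer_instance

def pvWitness_row_array_idx : List Int × List Int := ([2, 1, 3], [4, 5, 6])

def Spec_row_array_idx (indices : List Int) (shape : List Int) (out : Int) : Prop := out = row_array_idx_alt indices shape
instance (indices : List Int) (shape : List Int) (out : Int) : Decidable (Spec_row_array_idx indices shape out) := by unfold Spec_row_array_idx; infer_instance

-- ===== CLAIM (what is proved, stated in full; the proofs are below) =====
def Claim_equal_row_array_idx : Prop := ∀ (indices : List Int) (shape : List Int), Dom_row_array_idx indices shape → Pre_row_array_idx indices shape → Spec_row_array_idx indices shape (row_array_idx indices shape)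

-- ===== LEMMAS AND PROOFS =====

-- A's state step, written as a foldr step (the countdown foldl IS a foldr over the ascending range)
def pvAStep (indices shape : List Int) (i : Int) (s : Int × Int) : Int × Int :=
  (s.1 + s.2 * PySem.List.pyGetD indices i 0, s.2 * PySem.List.pyGetD shape i 0)

def pvBStep (indices shape : List Int) (off : Int) (i : Int) : Int :=
  off * PySem.List.pyGetD shape i 0 + PySem.List.pyGetD indices i 0

-- key invariant: on any ascending index segment [a, n), Horner with seed acc equals acc * m + offset
-- where (offset, m) is A's foldr result on the same segment
theorem pv_key (indices shape : List Int) (a n : Int) (acc : Int) :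
    (PySem.List.pyRange a n 1).foldl (pvBStep indices shape) acc =
      acc * ((PySem.List.pyRange a n 1).foldr (pvAStep indices shape) (0, 1)).2 +
        ((PySem.List.pyRange a n 1).foldr (pvAStep indices shape) (0, 1)).1 := by
  by_cases h : n ≤ a
  · rw [PySem.List.pyRange_one_eq_nil h]; simp
  · rw [not_le] at h
    have hlt : (n - (a + 1)).toNat < (n - a).toNat := by omega
    rw [PySem.List.pyRange_one_cons h]
    simp only [List.foldl_cons, List.foldr_cons]
    rw [pv_key indices shape (a + 1) n]
    simp only [pvAStep, pvBStep]
    ring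
  termination_by (n - a).toNat

-- ===== VERDICT (by name: the statement is the Claim_ definition above) =====
theorem row_array_idx_spec : Claim_equal_row_array_idx := by
  intro indices shape _ _
  unfold Spec_row_array_idx row_array_idx row_array_idx_alt
  change (List.foldl
      (fun (s : Int × Int) i =>
        (s.1 + s.2 * PySem.List.pyGetD indices i 0, s.2 * PySem.List.pyGetD shape i 0))
      (0, 1) (PySem.List.pyRange ((shape.length : Int) - 1) (-1) (-1))).1 = _
  rw [PySem.List.pyRange_neg_one_eq_reverse]
  simp only [neg_add_cancel, sub_add_cancel, List.foldl_reverse]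
  show (List.foldr (pvAStep indices shape) (0, 1) (PySem.List.pyRange 0 (shape.length : Int) 1)).1 =
    List.foldl (pvBStep indices shape) 0 (PySem.List.pyRange 0 (shape.length : Int) 1)
  rw [pv_key indices shape 0 (shape.length : Int) 0]
  ring
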